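-- pv_equiv track=rewrite | github.com/0xchase/ctfs | ring0/crypto/tool.py | shift2
-- ===== SOURCE A (Python) =====
-- def shift2(message, LETTERS):
-- 	#LETTERS = 'ABCDEFGHIJKLMNOPQRSTUVWXYZabcdefghijklmnopqrstuvwxyz'
-- 	ret = []
--
-- 	for key in range(len(LETTERS)):
-- 		translated = ''
-- 		for symbol in message:
-- 			if symbol in LETTERS:
-- 				num = LETTERS.find(symbol)
-- 				num = num - key
-- 				if num < 0:
-- 					num = num + len(LETTERS)
-- 				translated = translated + LETTERS[num]
-- 			else:
-- 				translated = translated + symbol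
-- 		ret.append(translated)
-- 	return ret
-- ===== SOURCE B (Python) =====
-- def shift2(message, LETTERS):
--     n = len(LETTERS)
--     ret = []
--     for key in range(n):
--         table = {}
--         for i, c in enumerate(LETTERS):
--             code = ord(c)
--             if code not in table:
--                 table[code] = ord(LETTERS[(i - key) % n])
--         ret.append(message.translate(table))
--     return ret
-- ===== Notes on version B (the rewrite author's own statement) =====
-- stated objective: idiomatic
-- what changed: Instead of scanning LETTERS with find for every symbol of the message on every key, B builds one translation table per key (dict from code point to shifted code point, keeping first occurrences) and translates the message with a single lookup per character via str.translate.
import Mathlib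
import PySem

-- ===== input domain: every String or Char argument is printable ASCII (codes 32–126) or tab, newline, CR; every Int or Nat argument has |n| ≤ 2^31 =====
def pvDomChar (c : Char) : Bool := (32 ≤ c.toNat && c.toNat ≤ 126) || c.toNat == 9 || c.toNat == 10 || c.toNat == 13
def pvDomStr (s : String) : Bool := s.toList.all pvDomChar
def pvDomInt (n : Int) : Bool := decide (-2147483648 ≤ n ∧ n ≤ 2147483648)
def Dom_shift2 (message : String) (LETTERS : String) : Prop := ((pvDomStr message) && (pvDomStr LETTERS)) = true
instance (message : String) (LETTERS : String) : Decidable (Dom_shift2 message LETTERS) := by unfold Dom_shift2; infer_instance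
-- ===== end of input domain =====

-- B replaces A's per-symbol linear scan of LETTERS with one translation table built per key
-- (first occurrence kept), then a single lookup per character — idiomatic str.translate style.

-- ===== PORT A =====
-- single characters: 'symbol in LETTERS' / 'LETTERS.find(symbol)' are exact as list membership / first index
def shift2 (message : String) (LETTERS : String) : List String :=
  let L := LETTERS.toList
  let n : Int := L.length
  (PySem.List.pyRange 0 n 1).foldl (fun ret key =>
    let translated := message.toList.foldl (fun translated symbol =>
      if symbol ∈ L then
        let num : Int := ((PySem.List.index? L symbol).getD 0 : Nat) - key
        let num := if num < 0 then num + n else num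
        translated ++ [(PySem.List.pyGet? L num).getD symbol]  -- index always in range; default unreached
      else translated ++ [symbol]) []
    ret ++ [String.mk translated]) []

-- ===== PORT B =====
def shift2_alt (message : String) (LETTERS : String) : List String :=
  let L := LETTERS.toList
  let n : Int := L.length
  (PySem.List.pyRange 0 n 1).map (fun key =>
    let table := (PySem.List.enumerate L).foldl
      (fun (t : PySem.Dict Char Char) ic =>
        if t.contains ic.2 then t
        else t.insert ic.2 ((PySem.List.pyGet? L (PySem.Int.mod (ic.1 - key) n)).getD ic.2))
      PySem.Dict.empty
    String.mk (message.toList.map (fun c => table.getD c c)))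

-- ===== PRECONDITION & SPEC =====
def Spec_shift2 (message : String) (LETTERS : String) (out : List String) : Prop := out = shift2_alt message LETTERS
instance (message : String) (LETTERS : String) (out : List String) : Decidable (Spec_shift2 message LETTERS out) := by unfold Spec_shift2; infer_instance

-- ===== CLAIM (what is proved, stated in full; the proofs are below) =====
def Claim_equal_shift2 : Prop := ∀ (message : String) (LETTERS : String), Dom_shift2 message LETTERS → Spec_shift2 message LETTERS (shift2 message LETTERS)

-- ===== LEMMAS AND PROOFS =====

-- append-accumulator fold is a map
theorem foldl_append_singleton {α β : Type} (l : List α) (f : α → β) (init : List β) :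
    l.foldl (fun acc x => acc ++ [f x]) init = init ++ l.map f := by
  induction l generalizing init with
  | nil => simp
  | cons x xs ih => simp [List.foldl, ih]

-- A's inner loop: append the translated char or the char itself
theorem foldl_ite_append (p : Char → Prop) [DecidablePred p] (f : Char → Char)
    (l : List Char) (init : List Char) :
    l.foldl (fun acc c => if p c then acc ++ [f c] else acc ++ [c]) init =
      init ++ l.map (fun c => if p c then f c else c) := by
  induction l generalizing init with
  | nil => simp
  | cons x xs ih =>
    simp only [List.foldl, List.map]
    by_cases hx : p x
    · rw [if_pos hx, if_pos hx, ih]; simp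
    · rw [if_neg hx, if_neg hx, ih]; simp

-- the "insert if absent" fold: lookup = old lookup, else the first matching pair's value
theorem get?_foldl_insertIfAbsent (ps : List (Int × Char)) (t : PySem.Dict Char Char)
    (val : Int × Char → Char) (c : Char) :
    (ps.foldl (fun t ic => if t.contains ic.2 then t else t.insert ic.2 (val ic)) t).get? c =
      ((t.get? c).or ((ps.find? (fun ic => ic.2 == c)).map val)) := by
  induction ps generalizing t with
  | nil => simp
  | cons p ps ih =>
    simp only [List.foldl]
    by_cases hpc : p.2 = c
    · rw [List.find?_cons_of_pos (by simp [hpc])]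
      by_cases hc : t.contains p.2 = true
      · rw [if_pos hc, ih]
        have hv : (t.get? c).isSome := by
          rw [hpc] at hc; rw [PySem.Dict.contains_eq_isSome_get?] at hc; exact hc
        rcases Option.isSome_iff_exists.mp hv with ⟨v, hv⟩
        simp [hv]
      · rw [if_neg hc, ih]
        have ht : t.get? c = none := by
          rw [hpc] at hc
          rcases hg : t.get? c with _ | v
          · rfl
          · exact absurd (by rw [PySem.Dict.contains_eq_isSome_get?, hg]; rfl) hc
        rw [ht]
        subst hpc
        rw [PySem.Dict.get?_insert_self]
        simp
    · rw [List.find?_cons_of_neg (by simp [hpc])]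
      by_cases hc : t.contains p.2 = true
      · rw [if_pos hc, ih]
      · rw [if_neg hc, ih, PySem.Dict.get?_insert, if_neg (fun hh => hpc hh.symm)]

-- find? over enumerate is index?
theorem find?_enumerate_eq_index? (L : List Char) (c : Char) (s : Int) :
    (PySem.List.enumerate L s).find? (fun ic => ic.2 == c) =
      (PySem.List.index? L c).map (fun (i : Nat) => (s + (i : Int), c)) := by
  induction L generalizing s with
  | nil => simp [PySem.List.enumerate_nil]
  | cons x xs ih =>
    rw [PySem.List.enumerate_cons]
    by_cases hxc : x = c
    · subst hxc
      rw [List.find?_cons_of_pos (by simp), PySem.List.index?_cons_self]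
      simp
    · rw [List.find?_cons_of_neg (by simp [hxc]), PySem.List.index?_cons_of_ne xs hxc, ih (s + 1)]
      rcases PySem.List.index? xs c with _ | i
      · rfl
      · simp only [Option.map_some, Option.some.injEq, Prod.mk.injEq]
        exact ⟨by push_cast; omega, trivial⟩

-- per-character agreement inside one key
theorem char_agree (L : List Char) (key : Int) (hk0 : 0 ≤ key) (hkn : key < (L.length : Int)) (c : Char) :
    (((PySem.List.enumerate L).foldl
      (fun (t : PySem.Dict Char Char) ic =>
        if t.contains ic.2 then t
        else t.insert ic.2 ((PySem.List.pyGet? L (PySem.Int.mod (ic.1 - key) (L.length : Int))).getD ic.2))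
      PySem.Dict.empty).getD c c) =
    (if c ∈ L then
      (PySem.List.pyGet? L
        (if ((((PySem.List.index? L c).getD 0 : Nat) : Int) - key) < 0
         then (((PySem.List.index? L c).getD 0 : Nat) : Int) - key + (L.length : Int)
         else (((PySem.List.index? L c).getD 0 : Nat) : Int) - key)).getD c
     else c) := by
  rw [PySem.Dict.getD_eq_get?_getD, get?_foldl_insertIfAbsent, find?_enumerate_eq_index? L c 0]
  rcases h : PySem.List.index? L c with _ | i
  · have hm : c ∉ L := (PySem.List.index?_eq_none_iff L c).mp h
    simp [hm]
  · have hm : c ∈ L := by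
      by_contra hc
      rw [(PySem.List.index?_eq_none_iff L c).mpr hc] at h
      cases h
    obtain ⟨hi, -, -⟩ := PySem.List.getElem_of_index?_eq_some h
    have hpos : (0 : Int) < (L.length : Int) := by exact_mod_cast Nat.zero_lt_of_lt hi
    simp only [Option.map_some, PySem.Dict.get?_empty, Option.none_or, Option.getD_some,
      if_pos hm]
    congr 2
    rw [PySem.Int.mod_eq_emod_of_pos hpos]
    have hi' : (i : Int) < (L.length : Int) := by exact_mod_cast hi
    rw [zero_add]
    split_ifs with hlt
    · rw [← Int.add_emod_right]
      exact Int.emod_eq_of_lt (by omega) (by omega)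
    · exact Int.emod_eq_of_lt (by omega) (by omega)

-- ===== VERDICT (by name: the statement is the Claim_ definition above) =====
theorem shift2_spec : Claim_equal_shift2 := by
  intro message LETTERS _
  unfold Spec_shift2 shift2 shift2_alt
  rw [foldl_append_singleton _ _ []]
  simp only [List.nil_append]
  apply List.map_congr_left
  intro key hkey
  rw [PySem.List.mem_pyRange_one] at hkey
  rw [foldl_ite_append _ _ _ []]
  simp only [List.nil_append]
  congr 1
  apply List.map_congr_left
  intro c _
  exact (char_agree LETTERS.toList key hkey.1 hkey.2 c).symm
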